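-- pv_equiv track=rewrite | github.com/ramer479/PythonProjectWorkBook | Beginner/LoveCalculator.py | get_count_way_elobarate
-- ===== SOURCE A (Python) =====
-- def get_count_way_elobarate(word, name1, name2):
--     names =  name1+name2
--     count = 0
--     for i in range(0,len(word)):
--         if word[i] in names:
--             for m in range(0,len(names)):
--                 if word[i] == names[m]:
--                     count += 1
--     return count
-- ===== SOURCE B (Python) =====
-- def get_count_way_elobarate(word, name1, name2):
--     names = name1 + name2
--     cw = {}
--     for c in word:
--         cw[c] = cw.get(c, 0) + 1
--     cn = {}
--     for c in names:
--         cn[c] = cn.get(c, 0) + 1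
--     total = 0
--     for c, k in cw.items():
--         total += k * cn.get(c, 0)
--     return total
-- ===== Notes on version B (the rewrite author's own statement) =====
-- stated objective: faster
-- what changed: Replaces the nested positional scan (for each word position, rescan all of names) by building two frequency tables once and summing cw[c]*cn[c] over the distinct characters of word.
import Mathlib
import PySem

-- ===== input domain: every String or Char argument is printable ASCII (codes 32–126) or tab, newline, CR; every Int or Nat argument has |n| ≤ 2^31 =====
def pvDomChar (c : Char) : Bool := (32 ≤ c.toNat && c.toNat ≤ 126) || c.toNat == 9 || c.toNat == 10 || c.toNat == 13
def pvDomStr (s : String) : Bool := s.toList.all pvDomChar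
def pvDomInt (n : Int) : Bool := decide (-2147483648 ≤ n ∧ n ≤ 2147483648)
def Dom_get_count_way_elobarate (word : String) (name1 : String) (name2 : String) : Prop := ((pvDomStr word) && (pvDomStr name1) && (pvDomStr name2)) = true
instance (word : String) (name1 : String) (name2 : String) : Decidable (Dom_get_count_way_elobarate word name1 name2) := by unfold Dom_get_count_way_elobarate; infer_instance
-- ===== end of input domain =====

-- B builds two character-frequency tables once and sums cw[c]*cn[c] over the distinct
-- characters of word, replacing A's nested positional rescan of names (asymptotically faster).


-- ===== PORT A =====
-- literal port of A over List Char; `word[i] in names` (a one-char string in a string)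
-- is exactly char-membership in the concatenated character list
def get_count_way_elobarate (word : String) (name1 : String) (name2 : String) : Int :=
  let names : List Char := name1.toList ++ name2.toList   -- names = name1 + name2
  let w : List Char := word.toList
  -- for i in range(0, len(word)): if word[i] in names: for m in range(0, len(names)): if word[i] == names[m]: count += 1
  (PySem.List.pyRange 0 (PySem.List.len w)).foldl
    (fun count i =>
      if PySem.List.pyGetD w i ' ' ∈ names then
        (PySem.List.pyRange 0 (PySem.List.len names)).foldl
          (fun count m =>
            if PySem.List.pyGetD w i ' ' == PySem.List.pyGetD names m ' ' then count + 1 else count)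
          count
      else count) 0

-- ===== PORT B =====
def get_count_way_elobarate_alt (word : String) (name1 : String) (name2 : String) : Int :=
  let names : List Char := name1.toList ++ name2.toList   -- names = name1 + name2
  -- cw[c] = cw.get(c, 0) + 1  over word; cn likewise over names
  let cw := word.toList.foldl (fun d c => d.insert c (d.getD c 0 + 1)) PySem.Dict.empty
  let cn := names.foldl (fun d c => d.insert c (d.getD c 0 + 1)) PySem.Dict.empty
  -- for c, k in cw.items(): total += k * cn.get(c, 0)
  cw.items.foldl (fun total p => total + p.2 * cn.getD p.1 0) 0

-- ===== PRECONDITION & SPEC =====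
def Spec_get_count_way_elobarate (word : String) (name1 : String) (name2 : String) (out : Int) : Prop := out = get_count_way_elobarate_alt word name1 name2
instance (word : String) (name1 : String) (name2 : String) (out : Int) : Decidable (Spec_get_count_way_elobarate word name1 name2 out) := by unfold Spec_get_count_way_elobarate; infer_instance

-- ===== CLAIM (what is proved, stated in full; the proofs are below) =====
def Claim_equal_get_count_way_elobarate : Prop := ∀ (word : String) (name1 : String) (name2 : String), Dom_get_count_way_elobarate word name1 name2 → Spec_get_count_way_elobarate word name1 name2 (get_count_way_elobarate word name1 name2)

-- ===== LEMMAS AND PROOFS =====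

-- A's inner loop over positions of ns counts the occurrences of c in ns
theorem pv_inner (ns : List Char) (c : Char) (a : Int) :
    (PySem.List.pyRange 0 (PySem.List.len ns)).foldl
      (fun count m => if c == PySem.List.pyGetD ns m ' ' then count + 1 else count) a
    = a + (ns.count c : Int) := by
  have h : (PySem.List.pyRange 0 (PySem.List.len ns)).foldl
      (fun count m => if c == PySem.List.pyGetD ns m ' ' then count + 1 else count) a
      = ((PySem.List.pyRange 0 (PySem.List.len ns)).map (fun m => PySem.List.pyGetD ns m ' ')).foldl
        (fun count x => if c == x then count + 1 else count) a := by
    rw [List.foldl_map]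
  rw [h, PySem.List.map_pyGetD_pyRange_zero ns ' ']
  have hc : ∀ x : Char, (c == x) = (x == c) := by intro x; simp [eq_comm]
  simp only [hc]
  exact PySem.List.foldl_beq_add_one ns c a

-- A computes the sum over all (with multiplicity) characters of word of their count in names
theorem pv_A_eq (word name1 name2 : String) :
    get_count_way_elobarate word name1 name2
    = (word.toList.map (fun c => (((name1.toList ++ name2.toList).count c : Nat) : Int))).sum := by
  unfold get_count_way_elobarate
  set ns := name1.toList ++ name2.toList with hns
  set w := word.toList with hw
  have hbody : (PySem.List.pyRange 0 (PySem.List.len w)).foldl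
      (fun count i =>
        if PySem.List.pyGetD w i ' ' ∈ ns then
          (PySem.List.pyRange 0 (PySem.List.len ns)).foldl
            (fun count m =>
              if PySem.List.pyGetD w i ' ' == PySem.List.pyGetD ns m ' ' then count + 1 else count)
            count
        else count) (0 : Int)
      = (PySem.List.pyRange 0 (PySem.List.len w)).foldl
          (fun count i => count + ((ns.count (PySem.List.pyGetD w i ' ') : Nat) : Int)) 0 := by
    apply PySem.List.foldl_congr_mem
    intro acc i _
    by_cases hmem : PySem.List.pyGetD w i ' ' ∈ ns
    · simp only [hmem, if_pos]
      exact pv_inner ns (PySem.List.pyGetD w i ' ') acc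
    · simp only [hmem, if_neg, not_false_eq_true, List.count_eq_zero.mpr hmem]
      simp
  rw [hbody, PySem.List.foldl_add]
  have hmap : (PySem.List.pyRange 0 (PySem.List.len w)).map
      (fun i => ((ns.count (PySem.List.pyGetD w i ' ') : Nat) : Int))
      = w.map (fun c => ((ns.count c : Nat) : Int)) := by
    have h2 := congrArg (List.map (fun c => ((ns.count c : Nat) : Int)))
      (PySem.List.map_pyGetD_pyRange_zero w ' ')
    rw [List.map_map] at h2
    exact h2
  rw [hmap]; ring

-- B computes the sum over the distinct characters of word of (count in word) * (count in names)
theorem pv_B_eq (word name1 name2 : String) :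
    get_count_way_elobarate_alt word name1 name2
    = ((PySem.Set.ofList word.toList).map
        (fun c => ((word.toList.count c : Nat) : Int) * (((name1.toList ++ name2.toList).count c : Nat) : Int))).sum := by
  unfold get_count_way_elobarate_alt
  simp only [PySem.Dict.foldl_insert_getD_add_one_eq_counter]
  rw [PySem.List.foldl_add ((PySem.Dict.counter word.toList).items)
      (fun p => p.2 * (PySem.Dict.counter (name1.toList ++ name2.toList)).getD p.1 0) 0]
  rw [PySem.Dict.items_counter, List.map_map]
  simp only [Function.comp_def, PySem.Dict.getD_counter]
  exact zero_add _

-- the multiset sum equals the distinct-keys weighted sum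
theorem pv_sum_dedup (l : List Char) (f : Char → Int) :
    (l.map f).sum = ((PySem.Set.ofList l).map (fun c => ((l.count c : Nat) : Int) * f c)).sum := by
  rw [Finset.sum_list_map_count l f]
  rw [Eq.symm (List.sum_toFinset (fun c => ((l.count c : Nat) : Int) * f c) (PySem.Set.nodup_ofList l))]
  have hfs : (PySem.Set.ofList l).toFinset = l.toFinset := by
    ext x; simp [PySem.Set.mem_ofList]
  rw [hfs]
  apply Finset.sum_congr rfl
  intro x _
  simp

-- ===== VERDICT (by name: the statement is the Claim_ definition above) =====
theorem get_count_way_elobarate_spec : Claim_equal_get_count_way_elobarate := by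
  intro word name1 name2 _
  unfold Spec_get_count_way_elobarate
  rw [pv_A_eq, pv_B_eq, pv_sum_dedup]
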